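-- pv_equiv track=rewrite | github.com/phantomzone-org/phantom-others | bool-api/boolean.py | arbitrary_unsigned_bit_comparator
-- ===== SOURCE A (Python) =====
-- def arbitrary_unsigned_bit_comparator(a: [bool], b:[bool]) -> bool:
--     '''
--     Assumes A and B are unsigned and returns True if A > B, otherwise False
--
--     Uses two gates:
--     (1) a[i] & !(b[i])
--         Outputs 1 iif a[i] > b[i]. In other words, outputs 1 only when a[i] = 1 and b[i] = 0
--
--     (2) !(a[i]^b[i])
--         Outputs 1 iif a[i] == b[i], otherwise 0
--
--     We then combine gates (1) and (2) to output whether A > B. The trick is to evaluate (1) for each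
--     bit index, but to consider output for bit i valid only when bits at higher signicant positions are
--     equal. This follows from the simple fact that first non-differing bit is enough to decide whether A>B.
--     Thus we simply ignore output of (1) bits at lesser signifcanct position the moment we find a position
--     with unequal bits
--
--     This function can be used to evaluate A<B, A<=B, A>=B
--     - A<B: Call the function with reversed position
--     - A<=B: !(A>B)
--     - A>=B: !(A<B)
--
--     # Signed comparison
--
--     Signed comparison is equivalent to Unsigned comparison after flipping the MSB. In other words, order of signed
--     values with flipped MSB equals order of unsigned values.
--
--     For ex,
--
--     GIVE 8 BIT EXAMPLE HERE
--     '''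
--     N = len(a)
--     assert len(a) == len(b)
--
--     # N-1
--     comp_bit = a[N-1] & (not b[N-1]) # N-1
--
--     # N-2
--     casc_bit = not (a[N-1]^b[N-1])
--     comp_bit = comp_bit | ((a[N-2] & (not b[N-2])) & casc_bit)
--
--     for j in range(N-3, -1, -1):
--         casc_bit = casc_bit & (not (a[j+1]^b[j+1]))
--         comp_bit = comp_bit | ((a[j] & (not b[j])) & casc_bit)
--
--     return comp_bit
-- ===== SOURCE B (Python) =====
-- def arbitrary_unsigned_bit_comparator(a: [bool], b: [bool]) -> bool:
--     assert len(a) == len(b)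
--     for x, y in zip(reversed(a), reversed(b)):
--         if x != y:
--             return x
--     return False
-- ===== Notes on version B (the rewrite author's own statement) =====
-- stated objective: simpler
-- what changed: Replaces A's cascade-bit OR-accumulator over all bit positions with an early-terminating scan from the most significant bit that returns a[i] at the first differing position (constant-factor win: early exit and no per-bit cascade/accumulator updates).
import Mathlib
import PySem

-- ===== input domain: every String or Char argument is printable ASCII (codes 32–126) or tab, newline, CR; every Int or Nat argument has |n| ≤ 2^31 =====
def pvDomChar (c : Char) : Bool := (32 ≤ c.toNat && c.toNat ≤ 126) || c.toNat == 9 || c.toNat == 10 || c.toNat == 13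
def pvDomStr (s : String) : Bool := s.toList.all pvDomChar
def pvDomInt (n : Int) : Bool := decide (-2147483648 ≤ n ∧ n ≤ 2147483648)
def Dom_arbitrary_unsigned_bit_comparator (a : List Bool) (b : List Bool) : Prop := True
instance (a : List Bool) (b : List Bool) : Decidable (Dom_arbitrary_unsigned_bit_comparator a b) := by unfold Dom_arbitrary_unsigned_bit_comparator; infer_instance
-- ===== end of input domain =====

-- B replaces A's cascade-bit OR-accumulator with an early-terminating first-difference
-- scan from the most significant bit (objective: simpler).

-- ===== PORT A =====
-- the 'for j in range(N-3, -1, -1)' countdown loop: fuel = number of remaining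
-- iterations, current j = fuel - 1 (so fuel N-2 starts at j = N-3 and ends at j = 0)
def arbitraryLoop (a : List Bool) (b : List Bool) : Nat → Bool → Bool → Bool
  | 0, _, comp_bit => comp_bit
  | n + 1, casc_bit, comp_bit =>
      let j : Int := (n : Int)
      let casc_bit := casc_bit && !(PySem.List.pyGetD a (j + 1) false ^^ PySem.List.pyGetD b (j + 1) false)
      let comp_bit := comp_bit || ((PySem.List.pyGetD a j false && !(PySem.List.pyGetD b j false)) && casc_bit)
      arbitraryLoop a b n casc_bit comp_bit

def arbitrary_unsigned_bit_comparator (a : List Bool) (b : List Bool) : Bool :=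
  let N : Int := (a.length : Int)
  let comp_bit := PySem.List.pyGetD a (N - 1) false && !(PySem.List.pyGetD b (N - 1) false)
  let casc_bit := !(PySem.List.pyGetD a (N - 1) false ^^ PySem.List.pyGetD b (N - 1) false)
  let comp_bit := comp_bit || ((PySem.List.pyGetD a (N - 2) false && !(PySem.List.pyGetD b (N - 2) false)) && casc_bit)
  arbitraryLoop a b (N - 2).toNat casc_bit comp_bit

-- ===== PORT B =====
-- 'for x, y in zip(reversed(a), reversed(b)): if x != y: return x' / 'return False'
def firstDiff : List Bool → List Bool → Bool
  | x :: xs, y :: ys => if x != y then x else firstDiff xs ys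
  | _, _ => false

def arbitrary_unsigned_bit_comparator_alt (a : List Bool) (b : List Bool) : Bool :=
  firstDiff a.reverse b.reverse

-- ===== PRECONDITION & SPEC =====
-- Pre_ excludes exactly the inputs where A raises: mismatched lengths (assert →
-- AssertionError) and the empty input (a[N-1] with N = 0 → IndexError).
def Pre_arbitrary_unsigned_bit_comparator (a : List Bool) (b : List Bool) : Prop :=
  a.length = b.length ∧ a ≠ []
instance (a : List Bool) (b : List Bool) : Decidable (Pre_arbitrary_unsigned_bit_comparator a b) := by unfold Pre_arbitrary_unsigned_bit_comparator; infer_instance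

def pvWitness_arbitrary_unsigned_bit_comparator : List Bool × List Bool := ([true, false], [false, true])

def Spec_arbitrary_unsigned_bit_comparator (a : List Bool) (b : List Bool) (out : Bool) : Prop := out = arbitrary_unsigned_bit_comparator_alt a b
instance (a : List Bool) (b : List Bool) (out : Bool) : Decidable (Spec_arbitrary_unsigned_bit_comparator a b out) := by unfold Spec_arbitrary_unsigned_bit_comparator; infer_instance

-- ===== CLAIM (what is proved, stated in full; the proofs are below) =====
def Claim_equal_arbitrary_unsigned_bit_comparator : Prop := ∀ (a : List Bool) (b : List Bool), Dom_arbitrary_unsigned_bit_comparator a b → Pre_arbitrary_unsigned_bit_comparator a b → Spec_arbitrary_unsigned_bit_comparator a b (arbitrary_unsigned_bit_comparator a b)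
-- ===== LEMMAS AND PROOFS =====

-- the value of the remaining loop, as a function of the still-unscanned suffix of the
-- reversed lists: the top pair only gates (its comp contribution is already in `comp`),
-- the rest is a first-difference scan
def wcomp : List Bool → List Bool → Bool
  | x :: xs, y :: ys => if x != y then false else firstDiff xs ys
  | _, _ => false

lemma getD_reverse (a : List Bool) (k : Nat) (hk : k < a.length) :
    a.reverse.getD k false = a.getD (a.length - 1 - k) false := by
  rw [List.getD_eq_getElem _ _ (by simpa using hk),
      List.getD_eq_getElem _ _ (by omega), List.getElem_reverse]

lemma pyGetD_nat (a : List Bool) (n : Nat) :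
    PySem.List.pyGetD a ((n : Int)) false = a.getD n false := by
  simp [PySem.List.pyGetD_natCast]

lemma drop_cons_getD (l : List Bool) (k : Nat) (hk : k < l.length) :
    l.drop k = l.getD k false :: l.drop (k + 1) := by
  rw [List.getD_eq_getElem _ _ hk]
  exact List.drop_eq_getElem_cons hk

lemma arbitraryLoop_eq (a b : List Bool) :
    ∀ (n k : Nat) (casc comp : Bool),
      k + (n + 2) = a.length → a.length = b.length →
      arbitraryLoop a b (n + 1) casc comp =
        (comp || (casc && wcomp (a.reverse.drop k) (b.reverse.drop k))) := by
  intro n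
  induction n with
  | zero =>
    intro k casc comp hk hlen
    have ha1 : PySem.List.pyGetD a (((0 : Nat) : Int) + 1) false = a.reverse.getD k false := by
      have : (((0 : Nat) : Int) + 1) = ((1 : Nat) : Int) := by norm_num
      rw [this, pyGetD_nat, getD_reverse a k (by omega)]
      congr 1; omega
    have hb1 : PySem.List.pyGetD b (((0 : Nat) : Int) + 1) false = b.reverse.getD k false := by
      have : (((0 : Nat) : Int) + 1) = ((1 : Nat) : Int) := by norm_num
      rw [this, pyGetD_nat, getD_reverse b k (by omega)]
      congr 1; omega
    have ha0 : PySem.List.pyGetD a ((0 : Nat) : Int) false = a.reverse.getD (k + 1) false := by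
      rw [pyGetD_nat, getD_reverse a (k + 1) (by omega)]
      congr 1; omega
    have hb0 : PySem.List.pyGetD b ((0 : Nat) : Int) false = b.reverse.getD (k + 1) false := by
      rw [pyGetD_nat, getD_reverse b (k + 1) (by omega)]
      congr 1; omega
    have hda : a.reverse.drop k = a.reverse.getD k false :: (a.reverse.drop (k + 1)) :=
      drop_cons_getD _ _ (by simp; omega)
    have hdb : b.reverse.drop k = b.reverse.getD k false :: (b.reverse.drop (k + 1)) :=
      drop_cons_getD _ _ (by simp; omega)
    have hda1 : a.reverse.drop (k + 1) = a.reverse.getD (k + 1) false :: (a.reverse.drop (k + 2)) :=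
      drop_cons_getD _ _ (by simp; omega)
    have hdb1 : b.reverse.drop (k + 1) = b.reverse.getD (k + 1) false :: (b.reverse.drop (k + 2)) :=
      drop_cons_getD _ _ (by simp; omega)
    have hnil_a : a.reverse.drop (k + 2) = [] := by
      apply List.drop_eq_nil_of_le; simp; omega
    have hnil_b : b.reverse.drop (k + 2) = [] := by
      apply List.drop_eq_nil_of_le; simp; omega
    simp only [arbitraryLoop, ha1, hb1, ha0, hb0, hda, hdb, hda1, hdb1, hnil_a, hnil_b, wcomp, firstDiff]
    cases a.reverse.getD k false <;> cases b.reverse.getD k false <;>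
      cases a.reverse.getD (k + 1) false <;> cases b.reverse.getD (k + 1) false <;>
      cases casc <;> cases comp <;> rfl
  | succ m ih =>
    intro k casc comp hk hlen
    have ha1 : PySem.List.pyGetD a (((m + 1 : Nat) : Int) + 1) false = a.reverse.getD k false := by
      have : (((m + 1 : Nat) : Int) + 1) = ((m + 2 : Nat) : Int) := by push_cast; ring
      rw [this, pyGetD_nat, getD_reverse a k (by omega)]
      congr 1; omega
    have hb1 : PySem.List.pyGetD b (((m + 1 : Nat) : Int) + 1) false = b.reverse.getD k false := by
      have : (((m + 1 : Nat) : Int) + 1) = ((m + 2 : Nat) : Int) := by push_cast; ring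
      rw [this, pyGetD_nat, getD_reverse b k (by omega)]
      congr 1; omega
    have ha0 : PySem.List.pyGetD a (((m + 1 : Nat) : Int)) false = a.reverse.getD (k + 1) false := by
      rw [pyGetD_nat, getD_reverse a (k + 1) (by omega)]
      congr 1; omega
    have hb0 : PySem.List.pyGetD b (((m + 1 : Nat) : Int)) false = b.reverse.getD (k + 1) false := by
      rw [pyGetD_nat, getD_reverse b (k + 1) (by omega)]
      congr 1; omega
    have hda : a.reverse.drop k = a.reverse.getD k false :: (a.reverse.drop (k + 1)) :=
      drop_cons_getD _ _ (by simp; omega)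
    have hdb : b.reverse.drop k = b.reverse.getD k false :: (b.reverse.drop (k + 1)) :=
      drop_cons_getD _ _ (by simp; omega)
    have hda1 : a.reverse.drop (k + 1) = a.reverse.getD (k + 1) false :: (a.reverse.drop (k + 2)) :=
      drop_cons_getD _ _ (by simp; omega)
    have hdb1 : b.reverse.drop (k + 1) = b.reverse.getD (k + 1) false :: (b.reverse.drop (k + 2)) :=
      drop_cons_getD _ _ (by simp; omega)
    have step := ih (k + 1)
      (casc && !(a.reverse.getD k false ^^ b.reverse.getD k false))
      (comp || ((a.reverse.getD (k + 1) false && !(b.reverse.getD (k + 1) false)) &&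
        (casc && !(a.reverse.getD k false ^^ b.reverse.getD k false))))
      (by omega) hlen
    rw [arbitraryLoop]
    simp only [ha1, hb1, ha0, hb0]
    rw [step, hda, hdb, hda1, hdb1]
    simp only [wcomp, firstDiff]
    cases a.reverse.getD k false <;> cases b.reverse.getD k false <;>
      cases a.reverse.getD (k + 1) false <;> cases b.reverse.getD (k + 1) false <;>
      cases casc <;> cases comp <;> rfl

-- ===== VERDICT (by name: the statement is the Claim_ definition above) =====
theorem arbitrary_unsigned_bit_comparator_spec : Claim_equal_arbitrary_unsigned_bit_comparator := by
  intro a b _ hpre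
  obtain ⟨hlen, hne⟩ := hpre
  unfold Spec_arbitrary_unsigned_bit_comparator arbitrary_unsigned_bit_comparator arbitrary_unsigned_bit_comparator_alt
  have hN1 : 1 ≤ a.length := List.length_pos_iff.mpr hne
  by_cases h3 : 3 ≤ a.length
  case pos =>
    have hfuel : ((a.length : Int) - 2).toNat = (a.length - 3) + 1 := by omega
    have hNm1 : ((a.length : Int) - 1) = (((a.length - 1 : Nat)) : Int) := by omega
    have hNm2 : ((a.length : Int) - 2) = (((a.length - 2 : Nat)) : Int) := by omega
    have gA1 : PySem.List.pyGetD a ((a.length : Int) - 1) false = a.reverse.getD 0 false := by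
      rw [hNm1, pyGetD_nat, getD_reverse a 0 (by omega)]; congr 1
    have gB1 : PySem.List.pyGetD b ((a.length : Int) - 1) false = b.reverse.getD 0 false := by
      rw [hNm1, pyGetD_nat, getD_reverse b 0 (by omega)]; congr 1; omega
    have gA2 : PySem.List.pyGetD a ((a.length : Int) - 2) false = a.reverse.getD 1 false := by
      rw [hNm2, pyGetD_nat, getD_reverse a 1 (by omega)]; congr 1
    have gB2 : PySem.List.pyGetD b ((a.length : Int) - 2) false = b.reverse.getD 1 false := by
      rw [hNm2, pyGetD_nat, getD_reverse b 1 (by omega)]; congr 1; omega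
    have hd0a : a.reverse.drop 0 = a.reverse.getD 0 false :: a.reverse.drop 1 :=
      drop_cons_getD _ _ (by simp; omega)
    have hd0b : b.reverse.drop 0 = b.reverse.getD 0 false :: b.reverse.drop 1 :=
      drop_cons_getD _ _ (by simp; omega)
    have hd1a : a.reverse.drop 1 = a.reverse.getD 1 false :: a.reverse.drop 2 :=
      drop_cons_getD _ _ (by simp; omega)
    have hd1b : b.reverse.drop 1 = b.reverse.getD 1 false :: b.reverse.drop 2 :=
      drop_cons_getD _ _ (by simp; omega)
    have hmain := arbitraryLoop_eq a b (a.length - 3) 1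
      (!(a.reverse.getD 0 false ^^ b.reverse.getD 0 false))
      ((a.reverse.getD 0 false && !(b.reverse.getD 0 false)) ||
        ((a.reverse.getD 1 false && !(b.reverse.getD 1 false)) &&
          !(a.reverse.getD 0 false ^^ b.reverse.getD 0 false)))
      (by omega) hlen
    simp only [gA1, gB1, gA2, gB2, hfuel]
    rw [hmain]
    have hfd : firstDiff a.reverse b.reverse =
        firstDiff (a.reverse.drop 0) (b.reverse.drop 0) := by simp
    rw [hfd, hd0a, hd0b, hd1a, hd1b]
    simp only [wcomp, firstDiff]
    cases a.reverse.getD 0 false <;> cases b.reverse.getD 0 false <;>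
      cases a.reverse.getD 1 false <;> cases b.reverse.getD 1 false <;> rfl
  case neg =>
    rcases a with _ | ⟨x, _ | ⟨x0, _ | ⟨w, t⟩⟩⟩
    · exact absurd rfl hne
    · rcases b with _ | ⟨y, _ | ⟨y0, bt⟩⟩
      · simp at hlen
      · cases x <;> cases y <;> rfl
      · simp at hlen
    · rcases b with _ | ⟨y, _ | ⟨y0, _ | ⟨z, bt⟩⟩⟩
      · simp at hlen
      · simp at hlen
      · cases x <;> cases x0 <;> cases y <;> cases y0 <;> rfl
      · simp at hlen
    · simp at h3
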